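-- pv_equiv track=rewrite | github.com/Samarth-Manch/doc-parser | scripts/patch_docx_with_annotations.py | build_ws_index
-- ===== SOURCE A (Python) =====
-- def build_ws_index(raw: str):
--     """Return (normalized_text, mapping) where mapping[k] = raw_index of the
--     k-th char in normalized_text. Also returns len_after for end-mapping.
--     """
--     out_chars = []
--     mapping = []
--     last_was_space = True  # so leading whitespace is trimmed
--     i = 0
--     for ch in raw:
--         if ch.isspace() or ch == "\n" or ch == "\t":
--             if not last_was_space:
--                 out_chars.append(" ")
--                 mapping.append(i)
--                 last_was_space = True
--         else:
--             out_chars.append(ch)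
--             mapping.append(i)
--             last_was_space = False
--         i += 1
--     # strip trailing space in normalized
--     while out_chars and out_chars[-1] == " ":
--         out_chars.pop()
--         mapping.pop()
--     # for end-mapping past the last char, we also need to know raw length
--     return "".join(out_chars), mapping, len(raw)
-- ===== SOURCE B (Python) =====
-- def build_ws_index(raw: str):
--     """Return (normalized_text, mapping) where mapping[k] = raw_index of the
--     k-th char in normalized_text. Also returns len_after for end-mapping.
--
--     Recursive token decomposition: split the raw string into maximal
--     non-space tokens by recursion (skip a whitespace run, take one token,
--     recurse on the remainder) and join the tokens with single spaces, each
--     separator mapped to the raw index right after its preceding token (the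
--     first whitespace of the run).  Leading/trailing whitespace disappears
--     structurally, with no collapse flag and no trailing trim loop.
--     """
--     n = len(raw)
--
--     def go(i):
--         # normalize raw[i:]; returns (text, mapping with raw indices)
--         while i < n and raw[i].isspace():
--             i += 1
--         if i == n:
--             return "", []
--         j = i + 1
--         while j < n and not raw[j].isspace():
--             j += 1
--         text, mapping = go(j)
--         if text:
--             return raw[i:j] + " " + text, list(range(i, j)) + [j] + mapping
--         return raw[i:j], list(range(i, j))
--
--     text, mapping = go(0)
--     return text, mapping, n
-- ===== Notes on version B (the rewrite author's own statement) =====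
-- stated objective: alternative
-- what changed: B replaces A's stateful character scan (last_was_space flag plus a trailing pop loop) by a recursive token decomposition: skip a whitespace run, take one maximal non-space token, recurse on the rest, and join tokens with a single space mapped to the index right after the preceding token; leading/trailing whitespace disappears structurally.
import Mathlib
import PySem

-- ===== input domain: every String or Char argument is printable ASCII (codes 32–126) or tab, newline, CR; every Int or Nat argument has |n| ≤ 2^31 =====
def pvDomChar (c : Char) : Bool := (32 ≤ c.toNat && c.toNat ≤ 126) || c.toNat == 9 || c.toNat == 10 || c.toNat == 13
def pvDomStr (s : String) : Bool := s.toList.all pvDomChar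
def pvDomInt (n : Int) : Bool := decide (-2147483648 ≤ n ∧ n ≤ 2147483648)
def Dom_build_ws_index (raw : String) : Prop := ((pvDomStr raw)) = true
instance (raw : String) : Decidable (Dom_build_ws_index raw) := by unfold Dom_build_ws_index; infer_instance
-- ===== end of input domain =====

-- B replaces A's stateful collapse-scan (flag + trailing pop loop) by a recursive
-- token decomposition: skip a whitespace run, take one token, recurse, join with
-- a single space mapped to the index right after the preceding token (objective: alternative).

-- ===== PORT A =====
-- for ch in raw: eager emission with last_was_space flag
def pvLoopA : List Char → List Char → List Int → Bool → Int → List Char × List Int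
  | [], out, mapping, _, _ => (out, mapping)
  | ch :: rest, out, mapping, last, i =>
    if PySem.Chars.isspace ch || ch == '\n' || ch == '\t' then
      if !last then pvLoopA rest (out ++ [' ']) (mapping ++ [i]) true (i + 1)
      else pvLoopA rest out mapping last (i + 1)
    else pvLoopA rest (out ++ [ch]) (mapping ++ [i]) false (i + 1)

-- while out_chars and out_chars[-1] == " ": pop both
def pvStripA (out : List Char) (mapping : List Int) : List Char × List Int :=
  if h : out ≠ [] then
    if out.getLast h = ' ' then pvStripA out.dropLast mapping.dropLast
    else (out, mapping)
  else (out, mapping)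
termination_by out.length
decreasing_by
  have := List.length_pos_of_ne_nil h
  simp [List.length_dropLast]; omega

def build_ws_index (raw : String) : String × List Int × Int :=
  let r := pvLoopA raw.toList [] [] true 0
  let s := pvStripA r.1 r.2
  (String.ofList s.1, s.2, PySem.Str.len raw)

-- ===== PORT B =====
-- while i < n and raw[i].isspace(): i += 1   (returns remaining suffix and its absolute index)
def pvSkip : List Char → Int → List Char × Int
  | [], i => ([], i)
  | ch :: rest, i => if PySem.Chars.isspace ch then pvSkip rest (i + 1) else (ch :: rest, i)

-- while j < n and not raw[j].isspace(): j += 1   (returns token chars, rest, end index j)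
def pvTok : List Char → Int → List Char × List Char × Int
  | [], j => ([], [], j)
  | ch :: rest, j =>
    if PySem.Chars.isspace ch then ([], ch :: rest, j)
    else (ch :: (pvTok rest (j + 1)).1, (pvTok rest (j + 1)).2.1, (pvTok rest (j + 1)).2.2)

-- termination facts for the recursion of go (cited by pvGoB's decreasing_by)
lemma pvSkip_len (cs : List Char) : ∀ i : Int, (pvSkip cs i).1.length ≤ cs.length := by
  induction cs with
  | nil => intro i; simp [pvSkip]
  | cons ch rest ih =>
    intro i
    by_cases h : PySem.Chars.isspace ch = true
    · simp only [pvSkip, h, if_true]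
      exact le_trans (ih (i + 1)) (by simp)
    · simp [pvSkip, h]

lemma pvTok_len (cs : List Char) : ∀ j : Int, (pvTok cs j).2.1.length ≤ cs.length := by
  induction cs with
  | nil => intro j; simp [pvTok]
  | cons ch rest ih =>
    intro j
    by_cases h : PySem.Chars.isspace ch = true
    · simp [pvTok, h]
    · simp only [pvTok, h, if_false]
      exact le_trans (ih (j + 1)) (by simp)

-- def go(i): skip whitespace; if end return ("",[]); scan one token; recurse; join
def pvGoB (cs : List Char) (i : Int) : List Char × List Int :=
  let s := pvSkip cs i
  if hne : s.1 = [] then ([], [])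
  else
    let ch := s.1.head hne
    let r := s.1.tail
    let t := pvTok r (s.2 + 1)
    let g := pvGoB t.2.1 t.2.2
    if g.1 ≠ [] then ((ch :: t.1) ++ ' ' :: g.1, PySem.List.pyRange s.2 t.2.2 1 ++ t.2.2 :: g.2)
    else (ch :: t.1, PySem.List.pyRange s.2 t.2.2 1)
termination_by cs.length
decreasing_by
  have h1 := pvTok_len (pvSkip cs i).1.tail ((pvSkip cs i).2 + 1)
  have h2 := pvSkip_len cs i
  have h3 : (pvSkip cs i).1.length ≠ 0 := by
    intro h0; exact hne (List.eq_nil_of_length_eq_zero h0)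
  have h4 : (pvSkip cs i).1.tail.length = (pvSkip cs i).1.length - 1 := List.length_tail
  omega

def build_ws_index_alt (raw : String) : String × List Int × Int :=
  let g := pvGoB raw.toList 0
  (String.ofList g.1, g.2, PySem.Str.len raw)

-- ===== PRECONDITION & SPEC =====
def Spec_build_ws_index (raw : String) (out : String × List Int × Int) : Prop := out = build_ws_index_alt raw
instance (raw : String) (out : String × List Int × Int) : Decidable (Spec_build_ws_index raw out) := by unfold Spec_build_ws_index; infer_instance

-- ===== CLAIM (what is proved, stated in full; the proofs are below) =====
def Claim_equal_build_ws_index : Prop := ∀ (raw : String), Dom_build_ws_index raw → Spec_build_ws_index raw (build_ws_index raw)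

-- ===== LEMMAS AND PROOFS =====

-- proof-side intermediate: A's scan with the separator emitted lazily (pending index)
def pvLoopB : List Char → List Char → List Int → Int → Int → List Char × List Int
  | [], out, mapping, _, _ => (out, mapping)
  | ch :: rest, out, mapping, pending, i =>
    if PySem.Chars.isspace ch then
      if out ≠ [] ∧ pending < 0 then pvLoopB rest out mapping i (i + 1)
      else pvLoopB rest out mapping pending (i + 1)
    else
      if 0 ≤ pending then pvLoopB rest (out ++ [' '] ++ [ch]) (mapping ++ [pending] ++ [i]) (-1) (i + 1)
      else pvLoopB rest (out ++ [ch]) (mapping ++ [i]) pending (i + 1)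

def pvStripP (p : List Char × List Int) : List Char × List Int := pvStripA p.1 p.2

-- A's whitespace test is just isspace: '\n' and '\t' are already whitespace
lemma pvCondA_eq (ch : Char) :
    (PySem.Chars.isspace ch || ch == '\n' || ch == '\t') = PySem.Chars.isspace ch := by
  by_cases h1 : ch = '\n'
  · subst h1; decide
  · by_cases h2 : ch = '\t'
    · subst h2; decide
    · have e1 : (ch == '\n') = false := beq_eq_false_iff_ne.mpr h1
      have e2 : (ch == '\t') = false := beq_eq_false_iff_ne.mpr h2
      rw [e1, e2, Bool.or_false, Bool.or_false]

lemma pvSpace_ne (ch : Char) (h : PySem.Chars.isspace ch = false) : ch ≠ ' ' := by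
  intro he; subst he; exact absurd h (by decide)

-- the trailing-strip loop is the identity when the output does not end in a space
lemma pvStripA_done (out : List Char) (mapping : List Int)
    (h : out.getLast? ≠ some ' ') : pvStripA out mapping = (out, mapping) := by
  rw [pvStripA]
  split_ifs with hne hl
  · exact absurd (by rw [List.getLast?_eq_some_getLast hne, hl]) h
  · rfl
  · rfl

-- one pop step of the strip loop
lemma pvStripA_pop (out : List Char) (mapping : List Int) (p : Int) :
    pvStripA (out ++ [' ']) (mapping ++ [p]) = pvStripA out mapping := by
  rw [pvStripA]
  have hne : out ++ [' '] ≠ [] := by simp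
  rw [dif_pos hne, if_pos (List.getLast_concat), List.dropLast_concat, List.dropLast_concat]

-- loop invariant: A's state is the lazy loop's state, plus a trailing " " exactly when a
-- separator is pending; stripping A's final trailing space closes the gap
lemma pvKey (cs : List Char) :
    (∀ i : Int, 0 ≤ i → pvStripP (pvLoopA cs [] [] true i) = pvLoopB cs [] [] (-1) i) ∧
    (∀ (out : List Char) (mapping : List Int) (i : Int), 0 ≤ i → out.getLast? ≠ some ' ' → out ≠ [] →
      pvStripP (pvLoopA cs out mapping false i) = pvLoopB cs out mapping (-1) i) ∧
    (∀ (out : List Char) (mapping : List Int) (i p : Int), 0 ≤ i → 0 ≤ p → out.getLast? ≠ some ' ' → out ≠ [] →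
      pvStripP (pvLoopA cs (out ++ [' ']) (mapping ++ [p]) true i) = pvLoopB cs out mapping p i) := by
  induction cs with
  | nil =>
    refine ⟨?_, ?_, ?_⟩
    · intro i _
      simp [pvLoopA, pvLoopB, pvStripP, pvStripA]
    · intro out mapping i _ hl _
      simp [pvLoopA, pvLoopB, pvStripP, pvStripA_done _ _ hl]
    · intro out mapping i p _ _ hl _
      simp [pvLoopA, pvLoopB, pvStripP, pvStripA_pop, pvStripA_done _ _ hl]
  | cons ch cs ih =>
    obtain ⟨ihE, ihF, ihT⟩ := ih
    by_cases hs : PySem.Chars.isspace ch = true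
    · have hA : (PySem.Chars.isspace ch || ch == '\n' || ch == '\t') = true := by
        rw [pvCondA_eq]; exact hs
      refine ⟨?_, ?_, ?_⟩
      · intro i hi
        simp only [pvLoopA, pvLoopB]
        rw [hA, hs]
        simp only [Bool.not_true, reduceIte]
        exact ihE (i + 1) (by omega)
      · intro out mapping i hi hl hne
        simp only [pvLoopA, pvLoopB]
        rw [hA, hs]
        simp only [Bool.not_false, reduceIte]
        rw [if_pos (⟨hne, by norm_num⟩ : out ≠ [] ∧ (-1 : Int) < 0)]
        exact ihT out mapping (i + 1) i (by omega) hi hl hne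
      · intro out mapping i p hi hp hl hne
        simp only [pvLoopA, pvLoopB]
        rw [hA, hs]
        simp only [Bool.not_true, reduceIte]
        rw [if_neg (fun hq : out ≠ [] ∧ p < 0 => absurd hq.2 (by omega))]
        exact ihT out mapping (i + 1) p (by omega) hp hl hne
    · have hs' : PySem.Chars.isspace ch = false := by simpa using hs
      have hA : (PySem.Chars.isspace ch || ch == '\n' || ch == '\t') = false := by
        rw [pvCondA_eq]; exact hs'
      have hch : ch ≠ ' ' := pvSpace_ne ch hs'
      refine ⟨?_, ?_, ?_⟩
      · intro i hi
        simp only [pvLoopA, pvLoopB]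
        rw [hA, hs']
        simp only [Bool.false_eq_true, if_false]
        rw [if_neg (by norm_num : ¬(0 : Int) ≤ -1)]
        exact ihF ([] ++ [ch]) ([] ++ [i]) (i + 1) (by omega)
          (by simp [hch]) (by simp)
      · intro out mapping i hi hl hne
        simp only [pvLoopA, pvLoopB]
        rw [hA, hs']
        simp only [Bool.false_eq_true, if_false]
        rw [if_neg (by norm_num : ¬(0 : Int) ≤ -1)]
        exact ihF (out ++ [ch]) (mapping ++ [i]) (i + 1) (by omega)
          (by simp [hch]) (by simp)
      · intro out mapping i p hi hp hl hne
        simp only [pvLoopA, pvLoopB]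
        rw [hA, hs']
        simp only [Bool.false_eq_true, if_false]
        rw [if_pos hp]
        exact ihF (out ++ [' '] ++ [ch]) (mapping ++ [p] ++ [i]) (i + 1) (by omega)
          (by simp [hch]) (by simp)

-- ===== bridging the lazy loop to B's token recursion =====

-- the lazy loop's tail behaviour once the output is nonempty
def pvT : List Char → Int → Int → List Char × List Int
  | [], _, _ => ([], [])
  | ch :: rest, p, i =>
    if PySem.Chars.isspace ch then
      if p < 0 then pvT rest i (i + 1) else pvT rest p (i + 1)
    else
      if 0 ≤ p then
        (' ' :: ch :: (pvT rest (-1) (i + 1)).1, p :: i :: (pvT rest (-1) (i + 1)).2)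
      else
        (ch :: (pvT rest p (i + 1)).1, i :: (pvT rest p (i + 1)).2)

lemma pvLoopB_acc (cs : List Char) :
    ∀ (out : List Char) (mapping : List Int) (p i : Int), out ≠ [] →
      pvLoopB cs out mapping p i = (out ++ (pvT cs p i).1, mapping ++ (pvT cs p i).2) := by
  induction cs with
  | nil => intro out mapping p i _; simp [pvLoopB, pvT]
  | cons ch rest ih =>
    intro out mapping p i hne
    by_cases hs : PySem.Chars.isspace ch = true
    · by_cases hp : p < 0
      · simp only [pvLoopB, pvT, hs, if_true, if_pos (⟨hne, hp⟩ : out ≠ [] ∧ p < 0), if_pos hp]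
        exact ih out mapping i (i + 1) hne
      · simp only [pvLoopB, pvT, hs, if_true, if_neg (fun hq : out ≠ [] ∧ p < 0 => hp hq.2), if_neg hp]
        exact ih out mapping p (i + 1) hne
    · have hs' : PySem.Chars.isspace ch = false := by simpa using hs
      by_cases hp : 0 ≤ p
      · simp only [pvLoopB, pvT, hs', Bool.false_eq_true, if_false, if_pos hp]
        rw [ih (out ++ [' '] ++ [ch]) (mapping ++ [p] ++ [i]) (-1) (i + 1) (by simp)]
        simp
      · simp only [pvLoopB, pvT, hs', Bool.false_eq_true, if_false, if_neg hp]
        rw [ih (out ++ [ch]) (mapping ++ [i]) p (i + 1) (by simp)]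
        simp

-- unfolding equations for B's recursion
lemma pvSkip_space {ch : Char} (rest : List Char) (i : Int) (h : PySem.Chars.isspace ch = true) :
    pvSkip (ch :: rest) i = pvSkip rest (i + 1) := by simp [pvSkip, h]

lemma pvSkip_nospace {ch : Char} (rest : List Char) (i : Int) (h : PySem.Chars.isspace ch = false) :
    pvSkip (ch :: rest) i = (ch :: rest, i) := by simp [pvSkip, h]

lemma pvTok_space {ch : Char} (rest : List Char) (j : Int) (h : PySem.Chars.isspace ch = true) :
    pvTok (ch :: rest) j = ([], ch :: rest, j) := by simp [pvTok, h]

lemma pvTok_nospace {ch : Char} (rest : List Char) (j : Int) (h : PySem.Chars.isspace ch = false) :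
    pvTok (ch :: rest) j = (ch :: (pvTok rest (j + 1)).1, (pvTok rest (j + 1)).2.1, (pvTok rest (j + 1)).2.2) := by
  simp [pvTok, h]

lemma pvTok_idx (cs : List Char) : ∀ j : Int, j ≤ (pvTok cs j).2.2 := by
  induction cs with
  | nil => intro j; simp [pvTok]
  | cons ch rest ih =>
    intro j
    by_cases h : PySem.Chars.isspace ch = true
    · simp [pvTok, h]
    · simp only [pvTok, h, if_false]
      exact le_trans (by omega) (ih (j + 1))

lemma pvGoB_nil (i : Int) : pvGoB [] i = ([], []) := by
  rw [pvGoB]; simp [pvSkip]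

lemma pvGoB_skip {ch : Char} (rest : List Char) (i : Int) (h : PySem.Chars.isspace ch = true) :
    pvGoB (ch :: rest) i = pvGoB rest (i + 1) := by
  rw [pvGoB, pvGoB, pvSkip_space rest i h]

lemma pvGoB_tok {ch : Char} (rest : List Char) (i : Int) (h : PySem.Chars.isspace ch = false) :
    pvGoB (ch :: rest) i =
      if (pvGoB (pvTok rest (i + 1)).2.1 (pvTok rest (i + 1)).2.2).1 ≠ [] then
        ((ch :: (pvTok rest (i + 1)).1) ++ ' ' :: (pvGoB (pvTok rest (i + 1)).2.1 (pvTok rest (i + 1)).2.2).1,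
         PySem.List.pyRange i (pvTok rest (i + 1)).2.2 1
           ++ (pvTok rest (i + 1)).2.2 :: (pvGoB (pvTok rest (i + 1)).2.1 (pvTok rest (i + 1)).2.2).2)
      else (ch :: (pvTok rest (i + 1)).1, PySem.List.pyRange i (pvTok rest (i + 1)).2.2 1) := by
  conv_lhs => rw [pvGoB]
  rw [pvSkip_nospace rest i h]
  simp

-- consuming one more non-space char into the current token
lemma pvGoB_cons_tok {ch c2 : Char} (rest : List Char) (i : Int)
    (h1 : PySem.Chars.isspace ch = false) (h2 : PySem.Chars.isspace c2 = false) :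
    pvGoB (ch :: c2 :: rest) i
      = (ch :: (pvGoB (c2 :: rest) (i + 1)).1, i :: (pvGoB (c2 :: rest) (i + 1)).2) := by
  rw [pvGoB_tok (c2 :: rest) i h1, pvGoB_tok rest (i + 1) h2, pvTok_nospace rest (i + 1) h2]
  have hj : i < (pvTok rest (i + 1 + 1)).2.2 := lt_of_lt_of_le (by omega) (pvTok_idx rest (i + 1 + 1))
  rw [PySem.List.pyRange_one_cons hj]
  split_ifs with hg
  · simp
  · simp

-- the tail function computes B's recursion (two statements, strong induction on length):
-- (1) pvGoB on a token-started suffix is the tail function with no pending separator;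
-- (2) the tail function with a pending separator prepends the collapsed space to pvGoB
lemma pvMain (n : Nat) : ∀ (cs : List Char), cs.length ≤ n →
    ((∀ (ch : Char) (i : Int), 0 ≤ i → PySem.Chars.isspace ch = false →
        pvGoB (ch :: cs) i = (ch :: (pvT cs (-1) (i + 1)).1, i :: (pvT cs (-1) (i + 1)).2)) ∧
     (∀ (p i : Int), 0 ≤ p → 0 ≤ i →
        pvT cs p i = if (pvGoB cs i).1 = [] then ([], [])
                     else (' ' :: (pvGoB cs i).1, p :: (pvGoB cs i).2))) := by
  induction n with
  | zero =>
    intro cs hlen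
    have : cs = [] := List.eq_nil_of_length_eq_zero (by omega)
    subst this
    constructor
    · intro ch i hi h
      rw [pvGoB_tok [] i h]
      simp [pvTok, pvGoB_nil, pvT, PySem.List.pyRange_one_singleton]
    · intro p i hp hi
      simp [pvT, pvGoB_nil]
  | succ n ihn =>
    intro cs hlen
    cases cs with
    | nil =>
      constructor
      · intro ch i hi h
        rw [pvGoB_tok [] i h]
        simp [pvTok, pvGoB_nil, pvT, PySem.List.pyRange_one_singleton]
      · intro p i hp hi
        simp [pvT, pvGoB_nil]
    | cons c2 rest2 =>
      have hlen2 : rest2.length ≤ n := by simp at hlen; omega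
      obtain ⟨ih1, ih2⟩ := ihn rest2 hlen2
      constructor
      · -- statement (1) for cs = c2 :: rest2
        intro ch i hi h
        by_cases h2 : PySem.Chars.isspace c2 = true
        · -- whitespace run starts right after the token's first char
          have hT : pvT (c2 :: rest2) (-1) (i + 1) = pvT rest2 (i + 1) (i + 1 + 1) := by
            simp [pvT, h2]
          rw [hT, ih2 (i + 1) (i + 1 + 1) (by omega) (by omega)]
          rw [pvGoB_tok (c2 :: rest2) i h, pvTok_space rest2 (i + 1) h2,
              pvGoB_skip rest2 (i + 1) h2]
          simp only [PySem.List.pyRange_one_singleton]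
          by_cases hg : (pvGoB rest2 (i + 1 + 1)).1 = []
          · simp [hg]
          · simp [hg]
        · have h2' : PySem.Chars.isspace c2 = false := by simpa using h2
          have hT : pvT (c2 :: rest2) (-1) (i + 1)
              = (c2 :: (pvT rest2 (-1) (i + 1 + 1)).1, (i + 1) :: (pvT rest2 (-1) (i + 1 + 1)).2) := by
            simp [pvT, h2']
          rw [hT, pvGoB_cons_tok rest2 i h h2', ih1 c2 (i + 1) (by omega) h2']
      · -- statement (2) for cs = c2 :: rest2
        intro p i hp hi
        by_cases h2 : PySem.Chars.isspace c2 = true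
        · have hT : pvT (c2 :: rest2) p i = pvT rest2 p (i + 1) := by
            simp [pvT, h2, show ¬p < 0 by omega]
          rw [hT, ih2 p (i + 1) hp (by omega), pvGoB_skip rest2 i h2]
        · have h2' : PySem.Chars.isspace c2 = false := by simpa using h2
          have hT : pvT (c2 :: rest2) p i
              = (' ' :: c2 :: (pvT rest2 (-1) (i + 1)).1, p :: i :: (pvT rest2 (-1) (i + 1)).2) := by
            simp [pvT, h2', hp]
          rw [hT, ih1 c2 i hi h2']
          simp

-- the lazy loop from the empty state is B's recursion
lemma pvLoopB_go (cs : List Char) : ∀ i : Int, 0 ≤ i → pvLoopB cs [] [] (-1) i = pvGoB cs i := by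
  induction cs with
  | nil => intro i _; simp [pvLoopB, pvGoB_nil]
  | cons ch rest ih =>
    intro i hi
    by_cases hs : PySem.Chars.isspace ch = true
    · simp only [pvLoopB, hs, if_true]
      rw [if_neg (by simp)]
      rw [ih (i + 1) (by omega), pvGoB_skip rest i hs]
    · have hs' : PySem.Chars.isspace ch = false := by simpa using hs
      simp only [pvLoopB, hs', Bool.false_eq_true, if_false]
      rw [if_neg (by norm_num : ¬(0 : Int) ≤ -1)]
      rw [pvLoopB_acc rest ([] ++ [ch]) ([] ++ [i]) (-1) (i + 1) (by simp)]
      rw [((pvMain rest.length) rest le_rfl).1 ch i hi hs']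
      simp

-- ===== VERDICT (by name: the statement is the Claim_ definition above) =====
theorem build_ws_index_spec : Claim_equal_build_ws_index := by
  intro raw _
  unfold Spec_build_ws_index build_ws_index build_ws_index_alt
  have h1 : pvStripA (pvLoopA raw.toList [] [] true 0).1 (pvLoopA raw.toList [] [] true 0).2
      = pvLoopB raw.toList [] [] (-1) 0 := by
    simpa [pvStripP] using (pvKey raw.toList).1 0 le_rfl
  have h2 : pvLoopB raw.toList [] [] (-1) 0 = pvGoB raw.toList 0 :=
    pvLoopB_go raw.toList 0 le_rfl
  simp [h1, h2]
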